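-- pv_equiv track=rewrite | github.com/sun-roc/MIT-6.01SC-EECS | designLab14/replannerRace.py | IsActionEq
-- ===== SOURCE A (Python) =====
-- def IsActionEq(a):
--     if len(a) < 2:
--         return 0
--     original = len(a)
--     if a[0] == (1, 1) or a[0] == (-1, -1) or a[0] == (1, -1) or a[0] == (-1, 1):
--         return original - len(a)
--     else:
--         if a[0] == a[1]:
--             a.pop(0)
--             IsActionEq(a)
--             return original - len(a) - 1
--         else:
--             return original - len(a)
-- ===== SOURCE B (Python) =====
-- _DIAGONALS = ((1, 1), (-1, -1), (1, -1), (-1, 1))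
--
-- def IsActionEq(a):
--     count = 0
--     while len(a) >= 2 and a[0] not in _DIAGONALS and a[0] == a[1]:
--         a.pop(0)
--         count += 1
--     return count - 1 if count else 0
-- ===== Notes on version B (the rewrite author's own statement) =====
-- stated objective: simpler
-- what changed: Replaces the mutating recursion and length-difference arithmetic with a single explicit while-loop that pops equal leading non-diagonal pairs while counting, then applies the same count-1-if-nonzero return.
import Mathlib
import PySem

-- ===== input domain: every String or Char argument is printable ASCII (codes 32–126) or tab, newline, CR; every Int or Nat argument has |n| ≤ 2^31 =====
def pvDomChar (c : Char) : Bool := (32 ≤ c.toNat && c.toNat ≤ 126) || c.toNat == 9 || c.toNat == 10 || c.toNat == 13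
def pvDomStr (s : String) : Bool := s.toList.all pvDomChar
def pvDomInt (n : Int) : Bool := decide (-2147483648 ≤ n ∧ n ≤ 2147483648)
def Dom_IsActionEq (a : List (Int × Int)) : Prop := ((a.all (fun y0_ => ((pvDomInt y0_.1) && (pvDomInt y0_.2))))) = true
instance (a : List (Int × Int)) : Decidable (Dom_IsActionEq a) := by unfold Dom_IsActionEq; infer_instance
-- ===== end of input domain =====

-- B replaces A's mutating recursion by an explicit counting while-loop (same pops, same
-- count-1-if-nonzero return); equivalence here is about the RETURN value — A and B perform
-- the same in-place pops of the leading equal run, which the ports model functionally.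

-- ===== PORT A =====
-- A mutates `a` and uses the length difference; the port threads the mutated list through
-- the recursion, returning (final list, return value).
def IsActionEqM : List (Int × Int) → List (Int × Int) × Int
  | [] => ([], 0)
  | [x] => ([x], 0)
  | p :: q :: rest =>
    let original : Int := (p :: q :: rest).length
    if p = (1, 1) ∨ p = (-1, -1) ∨ p = (1, -1) ∨ p = (-1, 1) then
      (p :: q :: rest, original - (p :: q :: rest).length)
    else if p = q then
      -- a.pop(0); IsActionEq(a)  (return value of the recursive call is discarded by A)
      let r := IsActionEqM (q :: rest)
      (r.1, original - r.1.length - 1)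
    else
      (p :: q :: rest, original - (p :: q :: rest).length)

def IsActionEq (a : List (Int × Int)) : Int := (IsActionEqM a).2

-- ===== PORT B =====
-- the while-loop of Source B: pop equal leading non-diagonal pairs, counting
def altLoop : List (Int × Int) → Int → Int
  | p :: q :: rest, count =>
    if ¬ (p = (1, 1) ∨ p = (-1, -1) ∨ p = (1, -1) ∨ p = (-1, 1)) ∧ p = q then
      altLoop (q :: rest) (count + 1)
    else
      if count ≠ 0 then count - 1 else 0
  | _, count => if count ≠ 0 then count - 1 else 0

def IsActionEq_alt (a : List (Int × Int)) : Int := altLoop a 0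

-- ===== PRECONDITION & SPEC =====
def Spec_IsActionEq (a : List (Int × Int)) (out : Int) : Prop := out = IsActionEq_alt a
instance (a : List (Int × Int)) (out : Int) : Decidable (Spec_IsActionEq a out) := by unfold Spec_IsActionEq; infer_instance

-- ===== CLAIM (what is proved, stated in full; the proofs are below) =====
def Claim_equal_IsActionEq : Prop := ∀ (a : List (Int × Int)), Dom_IsActionEq a → Spec_IsActionEq a (IsActionEq a)

-- ===== LEMMAS AND PROOFS =====

-- number of pops both programs perform
def pops : List (Int × Int) → Nat
  | p :: q :: rest =>
    if ¬ (p = (1, 1) ∨ p = (-1, -1) ∨ p = (1, -1) ∨ p = (-1, 1)) ∧ p = q then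
      pops (q :: rest) + 1
    else 0
  | _ => 0

theorem isActionEqM_char : ∀ a : List (Int × Int),
    ((IsActionEqM a).1.length : Int) = (a.length : Int) - pops a ∧
    (IsActionEqM a).2 = (if pops a = 0 then (0 : Int) else (pops a : Int) - 1) := by
  intro a
  match a with
  | [] => simp [IsActionEqM, pops]
  | [x] => simp [IsActionEqM, pops]
  | p :: q :: rest =>
    have ih := isActionEqM_char (q :: rest)
    by_cases hd : p = (1, 1) ∨ p = (-1, -1) ∨ p = (1, -1) ∨ p = (-1, 1)
    · simp [IsActionEqM, pops, hd]
    · by_cases he : p = q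
      · have hcond : ¬ (p = (1, 1) ∨ p = (-1, -1) ∨ p = (1, -1) ∨ p = (-1, 1)) ∧ p = q :=
          ⟨hd, he⟩
        simp only [IsActionEqM, pops, if_pos hcond, if_neg hd, if_pos he]
        rcases ih with ⟨h1, _⟩
        constructor
        · simp only [List.length_cons] at h1 ⊢
          push_cast at h1 ⊢
          omega
        · simp only [List.length_cons] at h1 ⊢
          push_cast at h1 ⊢
          omega
      · simp [IsActionEqM, pops, hd, he]

theorem altLoop_char : ∀ (a : List (Int × Int)) (count : Int), 0 ≤ count →
    altLoop a count = (if count + pops a = 0 then (0 : Int) else count + pops a - 1) := by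
  intro a
  match a with
  | [] => intro c hc; simp [altLoop, pops]
  | [x] => intro c hc; simp [altLoop, pops]
  | p :: q :: rest =>
    intro c hc
    by_cases hcond : ¬ (p = (1, 1) ∨ p = (-1, -1) ∨ p = (1, -1) ∨ p = (-1, 1)) ∧ p = q
    · have ih := altLoop_char (q :: rest) (c + 1) (by omega)
      simp only [altLoop, if_pos hcond, pops, ih]
      have hp : (0 : Int) ≤ pops (q :: rest) := by positivity
      split_ifs <;> push_cast at * <;> omega
    · simp only [altLoop, pops, if_neg hcond]
      split_ifs <;> push_cast at * <;> omega

-- ===== VERDICT (by name: the statement is the Claim_ definition above) =====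
theorem IsActionEq_spec : Claim_equal_IsActionEq := by
  intro a _
  unfold Spec_IsActionEq IsActionEq IsActionEq_alt
  rw [(isActionEqM_char a).2, altLoop_char a 0 le_rfl]
  have hp : (0 : Int) ≤ pops a := by positivity
  split_ifs <;> push_cast at * <;> omega
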